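-- pv_equiv track=rewrite | github.com/EnigmatheuxOnYT/The_Descent_Beta | sources/credits_launcher.py | sep_text_tag
-- ===== SOURCE A (Python) =====
-- def sep_text_tag(text:str) -> list[tuple[str]]:
--     segments = []
--     i = 0
--
--     while i<len(text):
--         if text[i]=="<":
--             j = text.find(">",i)
--
--             if j==-1:#si on a pas de balise fermante
--                 segments.append(("text",text[i:]))
--                 break
--
--             tag_content=text[i+1:j].strip()
--             segments.append(("tag",tag_content))
--             i = j+1
--
--         else:
--             j = text.find("<",i)
--
--             if j==-1:#si y'a pas de balise ouvrante c que du text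
--                 segments.append(("text",text[i:]))
--                 break
--
--             segments.append(("text",text[i:j]))
--             i=j
--
--     return segments
-- ===== SOURCE B (Python) =====
-- def sep_text_tag(text: str) -> list[tuple[str]]:
--     # Consume the string from the front with str.partition instead of
--     # tracking an index with find(): the remainder shrinks each round.
--     segments = []
--     rest = text
--     while rest:
--         if rest.startswith("<"):
--             inner, sep, after = rest[1:].partition(">")
--             if not sep:  # unclosed tag: the whole remainder is text
--                 segments.append(("text", rest))
--                 break
--             segments.append(("tag", inner.strip()))
--             rest = after
--         else:
--             pre, sep, after = rest.partition("<")
--             segments.append(("text", pre))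
--             rest = sep + after
--     return segments
-- ===== Notes on version B (the rewrite author's own statement) =====
-- stated objective: idiomatic
-- what changed: Replaces the index/while/find state machine with a loop that consumes a shrinking remainder via str.partition triples, with no index arithmetic or slicing by positions.
import Mathlib
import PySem

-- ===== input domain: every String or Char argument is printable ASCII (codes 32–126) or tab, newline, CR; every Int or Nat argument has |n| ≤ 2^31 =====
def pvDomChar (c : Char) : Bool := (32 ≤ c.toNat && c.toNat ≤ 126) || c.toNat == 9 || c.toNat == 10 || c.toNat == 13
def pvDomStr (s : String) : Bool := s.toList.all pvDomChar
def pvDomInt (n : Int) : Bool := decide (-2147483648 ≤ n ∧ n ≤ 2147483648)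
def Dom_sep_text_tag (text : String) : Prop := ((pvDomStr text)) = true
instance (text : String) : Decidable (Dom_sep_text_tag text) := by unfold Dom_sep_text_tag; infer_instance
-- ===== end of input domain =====

-- B replaces A's index/while/find state machine with a partition-based loop over a shrinking remainder (idiomatic; same asymptotics).

-- helper used by the ports' termination proofs: singleton prefix = head
lemma single_prefix_iff {c : Char} {t : List Char} : [c] <+: t ↔ t.head? = some c := by
  cases t with
  | nil => simp
  | cons a u => simp [List.cons_prefix_cons, eq_comm]

-- ===== PORT A =====
-- A's while loop over the index i; text[i], text.find(sub, i) and the slices are the PySem primitives on the code-point list.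
def sepLoopA (cs : List Char) (i : Nat) : List (String × String) :=
  if h : i < cs.length then
    if hc : cs[i] = '<' then
      let j := PySem.Chars.findFrom cs ['>'] (i : Int)
      if hj : j = -1 then
        [("text", String.ofList (PySem.List.slice cs (some (i : Int)) none))]
      else
        ("tag", String.ofList (PySem.Chars.strip (PySem.List.slice cs (some ((i : Int) + 1)) (some j)))) :: sepLoopA cs (j.toNat + 1)
    else
      let j := PySem.Chars.findFrom cs ['<'] (i : Int)
      if hj : j = -1 then
        [("text", String.ofList (PySem.List.slice cs (some (i : Int)) none))]
      else
        ("text", String.ofList (PySem.List.slice cs (some (i : Int)) (some j))) :: sepLoopA cs j.toNat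
  else []
termination_by cs.length - i
decreasing_by
  · have hs := PySem.Chars.findFrom_natCast_spec cs ['>'] i (le_of_lt h) hj
    omega
  · have hs := PySem.Chars.findFrom_natCast_spec cs ['<'] i (le_of_lt h) hj
    obtain ⟨h1, h2, h3⟩ := hs
    have hne : (PySem.Chars.findFrom cs ['<'] (i : Int)).toNat ≠ i := by
      intro he
      rw [he, single_prefix_iff, List.head?_drop, List.getElem?_eq_getElem h] at h2
      exact hc (Option.some.inj h2)
    omega

def sep_text_tag (text : String) : List (String × String) := sepLoopA text.toList 0

-- ===== PORT B =====
-- s.partition(c) for a one-character separator: (before, sep, after); exact port of str.partition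
def partChar (cs : List Char) (c : Char) : List Char × List Char × List Char :=
  match cs.dropWhile (· ≠ c) with
  | [] => (cs.takeWhile (· ≠ c), [], [])
  | _ :: after => (cs.takeWhile (· ≠ c), [c], after)

-- Source B's while loop over the shrinking remainder `rest`
def altLoop : List Char → List (String × String)
  | [] => []
  | r :: rs =>
    if r = '<' then
      let p := partChar rs '>'
      if p.2.1 = [] then [("text", String.ofList (r :: rs))]
      else ("tag", String.ofList (PySem.Chars.strip p.1)) :: altLoop p.2.2
    else
      let p := partChar (r :: rs) '<'
      ("text", String.ofList p.1) :: altLoop (p.2.1 ++ p.2.2)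
termination_by rest => rest.length
decreasing_by
  · simp only [partChar]
    split
    · simp_all
    · rename_i heq
      have := List.length_dropWhile_le (fun x => x ≠ '>') rs
      rw [heq] at this
      simp at this ⊢
      omega
  · have heq : (r :: rs).dropWhile (· ≠ '<') = rs.dropWhile (· ≠ '<') := by
      simp [*]
    have := List.length_dropWhile_le (fun x => x ≠ '<') rs
    simp only [partChar]
    split <;> rename_i hsp <;> rw [heq] at hsp <;> simp <;> rw [hsp] at this <;> simp at this <;> omega

def sep_text_tag_alt (text : String) : List (String × String) := altLoop text.toList

-- ===== PRECONDITION & SPEC =====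
def Spec_sep_text_tag (text : String) (out : List (String × String)) : Prop := out = sep_text_tag_alt text
instance (text : String) (out : List (String × String)) : Decidable (Spec_sep_text_tag text out) := by unfold Spec_sep_text_tag; infer_instance

-- ===== CLAIM (what is proved, stated in full; the proofs are below) =====
def Claim_equal_sep_text_tag : Prop := ∀ (text : String), Dom_sep_text_tag text → Spec_sep_text_tag text (sep_text_tag text)

-- ===== LEMMAS AND PROOFS =====

-- singleton prefix of a drop = the element there
lemma prefix_drop_iff {c : Char} {l : List Char} {m : Nat} :
    [c] <+: l.drop m ↔ l[m]? = some c := by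
  rw [single_prefix_iff, List.head?_drop]

-- the Bool predicate of partChar, negated, is equality with the separator
lemma not_ne_eq_beq (c : Char) : (fun x : Char => !(decide (x ≠ c))) = (fun x : Char => x == c) := by
  funext x; by_cases hx : x = c <;> simp [hx]

-- the element at the first index is the needle
lemma getElem?_findIdx {c : Char} {l : List Char} (hm : c ∈ l) :
    l[List.findIdx (· == c) l]? = some c := by
  have hn : List.findIdx (· == c) l < l.length :=
    List.findIdx_lt_length_of_exists ⟨c, hm, by simp⟩
  rw [List.getElem?_eq_getElem hn]
  have := List.findIdx_getElem (p := (· == c)) (xs := l) (w := hn)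
  simpa using this

lemma takeWhile_ne_eq_take (c : Char) (l : List Char) :
    l.takeWhile (· ≠ c) = l.take (List.findIdx (· == c) l) := by
  rw [List.takeWhile_eq_take_findIdx_not, not_ne_eq_beq]

lemma dropWhile_ne_eq_cons {c : Char} {l : List Char} (hm : c ∈ l) :
    l.dropWhile (· ≠ c) = c :: l.drop (List.findIdx (· == c) l + 1) := by
  have hn : List.findIdx (· == c) l < l.length :=
    List.findIdx_lt_length_of_exists ⟨c, hm, by simp⟩
  rw [List.dropWhile_eq_drop_findIdx_not, not_ne_eq_beq, List.drop_eq_getElem_cons hn]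
  have h2 := getElem?_findIdx hm
  rw [List.getElem?_eq_getElem hn] at h2
  rw [Option.some.inj h2]

-- Python's s.find(c) for a one-character needle, as the first index (findIdx)
lemma find_single (l : List Char) (c : Char) :
    PySem.Chars.find l [c] = if c ∈ l then ((List.findIdx (· == c) l : Nat) : Int) else -1 := by
  by_cases hm : c ∈ l
  · rw [if_pos hm]
    have hne : PySem.Chars.find l [c] ≠ -1 := by
      rw [Ne, PySem.Chars.find_eq_neg_one_iff]
      simp [List.singleton_infix_iff, hm]
    have hne' : PySem.Chars.findFrom l [c] ((0 : Nat) : Int) ≠ -1 := by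
      simpa [PySem.Chars.findFrom_zero] using hne
    obtain ⟨h1, h2, h3⟩ := PySem.Chars.findFrom_natCast_spec l [c] 0 (Nat.zero_le _) hne'
    have hfz : PySem.Chars.findFrom l [c] ((0 : Nat) : Int) = PySem.Chars.find l [c] := by
      simpa using PySem.Chars.findFrom_zero l [c]
    set f := PySem.Chars.findFrom l [c] ((0 : Nat) : Int) with hf
    have hn_lt : List.findIdx (· == c) l < l.length :=
      List.findIdx_lt_length_of_exists ⟨c, hm, by simp⟩
    have hgn : l[List.findIdx (· == c) l]? = some c := getElem?_findIdx hm
    rw [prefix_drop_iff] at h2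
    have hft_lt : f.toNat < l.length := (List.getElem?_eq_some_iff.mp h2).1
    have h4 : ¬ f.toNat < List.findIdx (· == c) l := by
      intro hlt
      have hnot := List.not_of_lt_findIdx hlt (xs := l)
      rw [List.getElem?_eq_getElem hft_lt] at h2
      simp at hnot
      exact hnot (Option.some.inj h2)
    have h5 : ¬ List.findIdx (· == c) l < f.toNat := by
      intro hlt
      exact (h3 _ (Nat.zero_le _) hlt) (prefix_drop_iff.mpr hgn)
    rw [← hfz]
    omega
  · rw [if_neg hm, PySem.Chars.find_eq_neg_one_iff]
    simp [List.singleton_infix_iff, hm]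

theorem loop_eq (cs : List Char) (i : Nat) (h : i ≤ cs.length) :
    sepLoopA cs i = altLoop (cs.drop i) := by
  rw [sepLoopA]
  by_cases h' : i < cs.length
  · rw [dif_pos h']
    have hdrop : cs.drop i = cs[i] :: cs.drop (i+1) := List.drop_eq_getElem_cons h'
    have hlen : (cs.drop i).length = cs.length - i := by simp
    by_cases hc : cs[i] = '<'
    · rw [dif_pos hc]
      have hF := PySem.Chars.findFrom_natCast cs ['>'] i h
      have hfs := find_single (cs.drop i) '>'
      by_cases hin : '>' ∈ cs.drop i
      · rw [if_pos hin] at hfs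
        set t := List.findIdx (· == '>') (cs.drop i) with ht
        have ht_lt : t < cs.length - i := by
          rw [← hlen]; exact List.findIdx_lt_length_of_exists ⟨'>', hin, by simp⟩
        have hrest_in : '>' ∈ cs.drop (i+1) := by
          rw [hdrop] at hin
          rcases List.mem_cons.mp hin with he | he
          · exact absurd he.symm (by rw [hc]; decide)
          · exact he
        have ht_dec : t = List.findIdx (· == '>') (cs.drop (i+1)) + 1 := by
          rw [ht, hdrop, List.findIdx_cons]
          simp [hc]
        have htr : List.findIdx (· == '>') (cs.drop (i+1)) = t - 1 := by omega
        have ht_pos : 1 ≤ t := by omega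
        have hFv : PySem.Chars.findFrom cs ['>'] (i : Int) = (i : Int) + (t : Int) := by
          rw [hF, hfs]; simp
        rw [hFv]
        rw [dif_neg (by omega : ¬((i : Int) + (t : Int) = -1))]
        have htn : (((i : Int) + (t : Int)).toNat) = i + t := by omega
        rw [htn]
        -- the tag content slice
        have hslice : PySem.List.slice cs (some ((i : Int) + 1)) (some ((i : Int) + (t : Int)))
            = (cs.drop (i+1)).take (t - 1) := by
          have hs := PySem.List.slice_natCast_add cs (i+1) (t-1)
          have e1 : (((i+1 : Nat)) : Int) = (i : Int) + 1 := by push_cast; ring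
          rw [e1] at hs
          have e2 : (i : Int) + 1 + ((t-1 : Nat) : Int) = (i : Int) + (t : Int) := by omega
          rw [e2] at hs
          exact hs
        -- the B side
        have hdw : (cs.drop (i+1)).dropWhile (· ≠ '>')
            = '>' :: (cs.drop (i+1)).drop t := by
          rw [dropWhile_ne_eq_cons hrest_in, htr]
          congr 2
          omega
        have htw : (cs.drop (i+1)).takeWhile (· ≠ '>') = (cs.drop (i+1)).take (t-1) := by
          rw [takeWhile_ne_eq_take, htr]
        rw [hdrop, altLoop]
        rw [if_pos hc]
        simp only [partChar, hdw, htw]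
        rw [if_neg (by simp : ¬(['>'] : List Char) = [])]
        rw [hslice]
        congr 1
        have hrec := loop_eq cs (i + t + 1) (by omega)
        rw [hrec]
        congr 1
        rw [List.drop_drop]
        congr 1
        omega
      · rw [if_neg hin] at hfs
        rw [hF, hfs]
        rw [if_pos rfl, dif_pos rfl]
        rw [PySem.List.slice_from_natCast]
        have hdw : (cs.drop (i+1)).dropWhile (· ≠ '>') = [] := by
          rw [List.dropWhile_eq_nil_iff]
          intro x hx
          simp only [ne_eq, decide_eq_true_eq]
          intro he
          exact hin (by rw [hdrop]; exact List.mem_cons_of_mem _ (he ▸ hx))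
        rw [hdrop, altLoop, if_pos hc]
        simp only [partChar, hdw]
        split
        · rfl
        · simp_all
    · rw [dif_neg hc]
      have hF := PySem.Chars.findFrom_natCast cs ['<'] i h
      have hfs := find_single (cs.drop i) '<'
      by_cases hin : '<' ∈ cs.drop i
      · rw [if_pos hin] at hfs
        set t := List.findIdx (· == '<') (cs.drop i) with ht
        have ht_lt : t < cs.length - i := by
          rw [← hlen]; exact List.findIdx_lt_length_of_exists ⟨'<', hin, by simp⟩
        have ht_dec : t = List.findIdx (· == '<') (cs.drop (i+1)) + 1 := by
          have hb : (cs[i] == '<') = false := by simp [hc]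
          rw [ht, hdrop, List.findIdx_cons, hb]
          rfl
        have ht_pos : 1 ≤ t := by omega
        have hFv : PySem.Chars.findFrom cs ['<'] (i : Int) = (i : Int) + (t : Int) := by
          rw [hF, hfs]; simp
        rw [hFv]
        rw [dif_neg (by omega : ¬((i : Int) + (t : Int) = -1))]
        have htn : (((i : Int) + (t : Int)).toNat) = i + t := by omega
        rw [htn]
        have hslice : PySem.List.slice cs (some (i : Int)) (some ((i : Int) + (t : Int)))
            = (cs.drop i).take t := PySem.List.slice_natCast_add cs i t
        have htw : (cs.drop i).takeWhile (· ≠ '<') = (cs.drop i).take t := by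
          rw [takeWhile_ne_eq_take, ← ht]
        have hdw : (cs.drop i).dropWhile (· ≠ '<') = '<' :: (cs.drop i).drop (t+1) := by
          rw [dropWhile_ne_eq_cons hin, ← ht]
        conv_rhs => rw [hdrop, altLoop]
        rw [if_neg hc, ← hdrop]
        simp only [partChar, hdw, htw]
        rw [hslice]
        congr 1
        have hrec := loop_eq cs (i + t) (by omega)
        rw [hrec]
        have hback : ('<' : Char) :: (cs.drop i).drop (t+1) = (cs.drop i).drop t := by
          rw [← hdw, List.dropWhile_eq_drop_findIdx_not, not_ne_eq_beq, ← ht]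
        rw [List.singleton_append, hback, List.drop_drop, Nat.add_comm]
      · rw [if_neg hin] at hfs
        rw [hF, hfs]
        rw [if_pos rfl, dif_pos rfl]
        rw [PySem.List.slice_from_natCast]
        have hdw : (cs.drop i).dropWhile (· ≠ '<') = [] := by
          rw [List.dropWhile_eq_nil_iff]
          intro x hx
          simp only [ne_eq, decide_eq_true_eq]
          intro he
          exact hin (he ▸ hx)
        have htw : (cs.drop i).takeWhile (· ≠ '<') = cs.drop i := by
          have hap := List.takeWhile_append_dropWhile (p := fun x : Char => decide (x ≠ '<')) (l := cs.drop i)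
          rw [hdw] at hap
          simpa using hap
        conv_rhs => rw [hdrop, altLoop]
        rw [if_neg hc, ← hdrop]
        simp only [partChar, hdw, htw]
        rw [List.nil_append, altLoop]
  · rw [dif_neg h', List.drop_eq_nil_of_le (by omega), altLoop]
termination_by cs.length - i

-- ===== VERDICT (by name: the statement is the Claim_ definition above) =====
theorem sep_text_tag_spec : Claim_equal_sep_text_tag := by
  intro text _
  unfold Spec_sep_text_tag sep_text_tag sep_text_tag_alt
  simpa using loop_eq text.toList 0 (by omega)
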